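-- pv_equiv track=rewrite | github.com/govinkul/crossjira | jira/bin/testautomation_assignee_mailer.py | group_issues_by_assignee
-- ===== SOURCE A (Python) =====
-- from collections import defaultdict
-- from typing import Any
--
-- def group_issues_by_assignee(
--     issues: list[dict[str, Any]],
-- ) -> tuple[dict[str, list[dict[str, Any]]], dict[str, dict[str, str]]]:
--     grouped: dict[str, list[dict[str, Any]]] = defaultdict(list)
--     profiles: dict[str, dict[str, str]] = {}
--     for issue in issues:
--         assignee = (issue.get("fields") or {}).get("assignee")
--         if not assignee:
--             grouped["unassigned"].append(issue)
--             profiles.setdefault(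
--                 "unassigned",
--                 {"displayName": "Unassigned", "accountId": "unassigned", "emailAddress": ""},
--             )
--             continue
--         account_id = assignee.get("accountId") or assignee.get("displayName") or "unknown"
--         grouped[account_id].append(issue)
--         profiles.setdefault(
--             account_id,
--             {
--                 "displayName": assignee.get("displayName") or account_id,
--                 "accountId": assignee.get("accountId") or account_id,
--                 "emailAddress": assignee.get("emailAddress") or "",
--             },
--         )
--     return grouped, profiles
-- ===== SOURCE B (Python) =====
-- from collections import defaultdict
--
--
-- def _assignee_of(issue):
--     return (issue.get("fields") or {}).get("assignee")
--
--
-- def _key_of(issue):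
--     assignee = _assignee_of(issue)
--     if not assignee:
--         return "unassigned"
--     return assignee.get("accountId") or assignee.get("displayName") or "unknown"
--
--
-- def _profile_of(issue):
--     assignee = _assignee_of(issue)
--     if not assignee:
--         return {"displayName": "Unassigned", "accountId": "unassigned", "emailAddress": ""}
--     key = assignee.get("accountId") or assignee.get("displayName") or "unknown"
--     return {
--         "displayName": assignee.get("displayName") or key,
--         "accountId": assignee.get("accountId") or key,
--         "emailAddress": assignee.get("emailAddress") or "",
--     }
--
--
-- def group_issues_by_assignee(issues):
--     grouped = defaultdict(list)
--     for issue in issues: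
--         grouped[_key_of(issue)].append(issue)
--     # profiles derived in a second pass, from the first issue of each group
--     # (= first occurrence, matching setdefault's first-wins semantics)
--     profiles = {key: _profile_of(group[0]) for key, group in grouped.items()}
--     return grouped, profiles
-- ===== Notes on version B (the rewrite author's own statement) =====
-- stated objective: alternative
-- what changed: Single loop interleaving grouping with setdefault-profile building is replaced by two passes: first group issues by key, then derive each profile from the first issue of its group.
import Mathlib
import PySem

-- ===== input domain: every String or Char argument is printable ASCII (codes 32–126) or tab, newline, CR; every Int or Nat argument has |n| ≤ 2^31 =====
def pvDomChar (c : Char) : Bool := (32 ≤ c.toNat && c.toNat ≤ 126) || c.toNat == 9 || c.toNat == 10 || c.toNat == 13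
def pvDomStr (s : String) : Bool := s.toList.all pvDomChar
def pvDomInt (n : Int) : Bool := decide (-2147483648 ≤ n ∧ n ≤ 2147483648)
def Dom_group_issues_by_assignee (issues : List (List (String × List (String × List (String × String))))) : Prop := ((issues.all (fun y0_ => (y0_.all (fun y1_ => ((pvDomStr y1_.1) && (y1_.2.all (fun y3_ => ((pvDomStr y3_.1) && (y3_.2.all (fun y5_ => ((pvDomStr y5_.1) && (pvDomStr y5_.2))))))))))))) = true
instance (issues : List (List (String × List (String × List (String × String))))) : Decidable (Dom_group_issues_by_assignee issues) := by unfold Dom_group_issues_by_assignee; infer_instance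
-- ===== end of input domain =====

-- B replaces A's single loop (grouping interleaved with profile setdefault) by two passes:
-- group first, then derive each profile from the first issue of its group. Objective: alternative decomposition.

-- an issue: dict str -> (dict str -> (dict str str))
abbrev PvIssue : Type := List (String × List (String × List (String × String)))

-- ===== PORT A =====
-- Python's `x or y` on Option String ("" and missing are falsy)
def pvOrStr (o : Option String) (d : String) : String :=
  match o with
  | some s => if s = "" then d else s
  | none => d

-- the loop body of A: one issue updates (grouped, profiles)
def pvAStep
    (st : PySem.Dict String (List PvIssue) × PySem.Dict String (List (String × String)))
    (issue : PvIssue) :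
    PySem.Dict String (List PvIssue) × PySem.Dict String (List (String × String)) :=
  let fields := ((PySem.Dict.mk issue).get? "fields").getD []
  match (PySem.Dict.mk fields).get? "assignee" with
  | none =>
      (st.1.modify "unassigned" [] (· ++ [issue]),
       st.2.setdefault "unassigned"
         [("displayName", "Unassigned"), ("accountId", "unassigned"), ("emailAddress", "")])
  | some a =>
      if a = [] then
        (st.1.modify "unassigned" [] (· ++ [issue]),
         st.2.setdefault "unassigned"
           [("displayName", "Unassigned"), ("accountId", "unassigned"), ("emailAddress", "")])
      else
        let ad := PySem.Dict.mk a
        let key := pvOrStr (ad.get? "accountId") (pvOrStr (ad.get? "displayName") "unknown")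
        (st.1.modify key [] (· ++ [issue]),
         st.2.setdefault key
           [("displayName", pvOrStr (ad.get? "displayName") key),
            ("accountId", pvOrStr (ad.get? "accountId") key),
            ("emailAddress", pvOrStr (ad.get? "emailAddress") "")])

def group_issues_by_assignee (issues : List (List (String × List (String × List (String × String))))) : (List (String × List (List (String × List (String × List (String × String)))))) × (List (String × List (String × String))) :=
  let st := issues.foldl pvAStep (PySem.Dict.empty, PySem.Dict.empty)
  (st.1.items, st.2.items)

-- ===== PORT B =====
-- Source B: _assignee_of
def pvAssigneeOf (issue : PvIssue) : Option (List (String × String)) :=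
  (PySem.Dict.mk (((PySem.Dict.mk issue).get? "fields").getD [])).get? "assignee"

-- Source B: _key_of
def pvKeyOf (issue : PvIssue) : String :=
  match pvAssigneeOf issue with
  | none => "unassigned"
  | some a =>
      if a = [] then "unassigned"
      else pvOrStr ((PySem.Dict.mk a).get? "accountId")
             (pvOrStr ((PySem.Dict.mk a).get? "displayName") "unknown")

-- Source B: _profile_of
def pvProfileOf (issue : PvIssue) : List (String × String) :=
  match pvAssigneeOf issue with
  | none => [("displayName", "Unassigned"), ("accountId", "unassigned"), ("emailAddress", "")]
  | some a =>
      if a = [] then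
        [("displayName", "Unassigned"), ("accountId", "unassigned"), ("emailAddress", "")]
      else
        let ad := PySem.Dict.mk a
        let key := pvOrStr (ad.get? "accountId") (pvOrStr (ad.get? "displayName") "unknown")
        [("displayName", pvOrStr (ad.get? "displayName") key),
         ("accountId", pvOrStr (ad.get? "accountId") key),
         ("emailAddress", pvOrStr (ad.get? "emailAddress") "")]

-- Source B: grouping loop body
def pvBStep (d : PySem.Dict String (List PvIssue)) (issue : PvIssue) :
    PySem.Dict String (List PvIssue) :=
  d.modify (pvKeyOf issue) [] (· ++ [issue])

def group_issues_by_assignee_alt (issues : List (List (String × List (String × List (String × String))))) : (List (String × List (List (String × List (String × List (String × String)))))) × (List (String × List (String × String))) :=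
  let grouped := issues.foldl pvBStep PySem.Dict.empty
  (grouped.items, grouped.items.map (fun p => (p.1, pvProfileOf (p.2.headD []))))

-- ===== PRECONDITION & SPEC =====
-- hand-assembled DecidableEq for the (deeply nested) output type: default instance search exceeds its size limit
def pvDec4 : DecidableEq (List (String × List (String × String))) := fun a b => @instDecidableEqList _ (fun a b => instDecidableEqProd a b) a b
def pvDec6 : DecidableEq (List (String × List (String × List (String × String)))) := fun a b => @instDecidableEqList _ (fun a b => (@instDecidableEqProd _ _ _ pvDec4) a b) a b
def pvDec9 : DecidableEq (List (String × List (List (String × List (String × List (String × String)))))) := fun a b => @instDecidableEqList _ (fun a b => (@instDecidableEqProd _ _ _ (@instDecidableEqList _ pvDec6)) a b) a b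
def pvDecOut : DecidableEq ((List (String × List (List (String × List (String × List (String × String)))))) × (List (String × List (String × String)))) := fun a b => (@instDecidableEqProd _ _ pvDec9 pvDec4) a b
def Spec_group_issues_by_assignee (issues : List (List (String × List (String × List (String × String))))) (out : (List (String × List (List (String × List (String × List (String × String)))))) × (List (String × List (String × String)))) : Prop := out = group_issues_by_assignee_alt issues
instance (issues : List PvIssue) (out : (List (String × List PvIssue)) × (List (String × List (String × String)))) : Decidable (Spec_group_issues_by_assignee issues out) := pvDecOut out (group_issues_by_assignee_alt issues)

-- ===== CLAIM (what is proved, stated in full; the proofs are below) =====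
def Claim_equal_group_issues_by_assignee : Prop := ∀ (issues : List (List (String × List (String × List (String × String))))), Dom_group_issues_by_assignee issues → Spec_group_issues_by_assignee issues (group_issues_by_assignee issues)

-- ===== LEMMAS AND PROOFS =====

-- the profile entry B computes for one group row
def pvPhi (q : String × List PvIssue) : String × List (String × String) :=
  (q.1, pvProfileOf (q.2.headD []))

-- A's step, written through B's helpers
theorem pvAStep_eq (st : PySem.Dict String (List PvIssue) × PySem.Dict String (List (String × String)))
    (issue : PvIssue) :
    pvAStep st issue = (pvBStep st.1 issue, st.2.setdefault (pvKeyOf issue) (pvProfileOf issue)) := by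
  unfold pvAStep pvBStep pvKeyOf pvProfileOf pvAssigneeOf
  cases h : (PySem.Dict.mk (((PySem.Dict.mk issue).get? "fields").getD [])).get? "assignee" with
  | none => simp [h]
  | some a => by_cases ha : a = [] <;> simp [h, ha]

theorem pvKeys_of_items_map (g : PySem.Dict String (List PvIssue))
    (p : PySem.Dict String (List (String × String)))
    (h : p.items = g.items.map pvPhi) : p.keys = g.keys := by
  simp only [PySem.Dict.keys, h, List.map_map]
  exact List.map_congr_left (fun q _ => rfl)

-- main loop invariant: grouped dicts coincide and A's profiles are B's row-wise map of grouped
theorem pvLoop (issues : List PvIssue) :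
    ∀ (g : PySem.Dict String (List PvIssue)) (p : PySem.Dict String (List (String × String))),
    p.items = g.items.map pvPhi →
    (∀ q ∈ g.items, q.2 ≠ []) →
    g.keys.Nodup →
    (issues.foldl pvAStep (g, p)).1 = issues.foldl pvBStep g ∧
    (issues.foldl pvAStep (g, p)).2.items = (issues.foldl pvBStep g).items.map pvPhi ∧
    (∀ q ∈ (issues.foldl pvBStep g).items, q.2 ≠ []) ∧
    (issues.foldl pvBStep g).keys.Nodup := by
  induction issues with
  | nil => intro g p h hne hnd; exact ⟨rfl, h, hne, hnd⟩
  | cons issue rest ih =>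
    intro g p h hne hnd
    simp only [List.foldl_cons, pvAStep_eq (g, p) issue]
    set k := pvKeyOf issue with hk
    have hkeq : p.contains k = g.contains k := by
      rw [PySem.Dict.contains_eq_decide_mem_keys, PySem.Dict.contains_eq_decide_mem_keys,
        pvKeys_of_items_map g p h]
    by_cases hc : g.contains k = true
    · -- key already present: B's modify rewrites the row; A's setdefault is a no-op
      have hset : p.setdefault k (pvProfileOf issue) = p :=
        PySem.Dict.setdefault_of_contains p _ (by rw [hkeq]; exact hc)
      rw [hset]
      apply ih
      · -- p.items still matches the modified grouped dict row-by-row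
        rw [h]
        show g.items.map pvPhi = (pvBStep g issue).items.map pvPhi
        unfold pvBStep PySem.Dict.modify
        rw [PySem.Dict.items_insert_of_contains g _ hc, List.map_map]
        apply List.map_congr_left
        intro q hq
        by_cases hq1 : q.1 = k
        · have hget : g.getD k [] = q.2 := by
            rw [← hq1]
            exact PySem.Dict.getD_of_mem_items g (k := q.1) (v := q.2) (by simpa using hq) hnd []
          have hne' := hne q hq
          cases hq2 : q.2 with
          | nil => exact absurd hq2 hne'
          | cons x xs =>
            have hget2 : g.getD (pvKeyOf issue) [] = x :: xs := by rw [← hk, hget, hq2]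
            simp [Function.comp, pvPhi, hq1, hq2, hget2]
        · simp [Function.comp, pvPhi, hq1]
      · -- group values stay nonempty
        unfold pvBStep PySem.Dict.modify
        rw [PySem.Dict.items_insert_of_contains g _ hc]
        intro q hq
        rcases List.mem_map.mp hq with ⟨q0, hq0, rfl⟩
        by_cases hq1 : q0.1 = k
        · simp [hq1]
        · simp [hq1]; exact hne q0 hq0
      · unfold pvBStep
        rw [PySem.Dict.keys_modify]
        exact PySem.Dict.nodup_keys_insert g _ _ hnd
    · -- fresh key: both sides append one row
      have hc' : g.contains k = false := by simpa using hc
      have hpc : p.contains k = false := by rw [hkeq]; exact hc'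
      have hgi : (pvBStep g issue).items = g.items ++ [(k, [issue])] := by
        unfold pvBStep PySem.Dict.modify
        rw [PySem.Dict.getD_of_not_contains g _ hc',
          PySem.Dict.items_insert_of_not_contains g _ hc']
        simp
      apply ih
      · show (p.setdefault k (pvProfileOf issue)).items = (pvBStep g issue).items.map pvPhi
        unfold PySem.Dict.setdefault
        rw [hpc]
        simp only [Bool.false_eq_true, if_false, hgi, List.map_append, h]
        rfl
      · rw [hgi]
        intro q hq
        rcases List.mem_append.mp hq with h1 | h1
        · exact hne q h1
        · simp at h1; simp [h1]
      · unfold pvBStep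
        rw [PySem.Dict.keys_modify]
        exact PySem.Dict.nodup_keys_insert g _ _ hnd

-- ===== VERDICT (by name: the statement is the Claim_ definition above) =====
theorem group_issues_by_assignee_spec : Claim_equal_group_issues_by_assignee := by
  intro issues _
  show group_issues_by_assignee issues = group_issues_by_assignee_alt issues
  have h := pvLoop issues PySem.Dict.empty PySem.Dict.empty rfl
    (by intro q hq; simp [PySem.Dict.empty] at hq)
    (by simp [PySem.Dict.keys_empty])
  dsimp only [group_issues_by_assignee, group_issues_by_assignee_alt]
  rw [h.1, h.2.1]
  simp [pvPhi]
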